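-- pv_equiv track=rewrite | github.com/j7johnny/who-is-rat | packages/anti7ocr/anti7ocr/text_ops.py | split_like_antiocr
-- ===== SOURCE A (Python) =====
-- import string
--
-- _ENG_LETTERS = set(string.digits + string.ascii_letters + string.punctuation + " ")
--
-- def split_like_antiocr(text: str) -> list[dict]:
--     """Split text into antiOCR-like cn/en chunks."""
--
--     if not text:
--         return []
--     parts: list[dict] = []
--     start = 0
--     current_type = "en" if text[0] in _ENG_LETTERS else "cn"
--     for idx, char in enumerate(text):
--         candidate_type = "en" if char in _ENG_LETTERS else "cn"
--         if candidate_type == current_type: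
--             continue
--         parts.append({"char": text[start:idx], "type": current_type})
--         start = idx
--         current_type = candidate_type
--     parts.append({"char": text[start:], "type": current_type})
--     return parts
-- ===== SOURCE B (Python) =====
-- import string
--
-- _ENG_LETTERS = set(string.digits + string.ascii_letters + string.punctuation + " ")
--
--
-- def split_like_antiocr(text: str) -> list[dict]:
--     """Split text into antiOCR-like cn/en chunks (single pass, grow-the-last-run)."""
--     parts: list[dict] = []
--     for ch in text:
--         ch_type = "en" if ch in _ENG_LETTERS else "cn"
--         if parts and parts[-1]["type"] == ch_type:
--             parts[-1]["char"] += ch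
--         else:
--             parts.append({"char": ch, "type": ch_type})
--     return parts
-- ===== Notes on version B (the rewrite author's own statement) =====
-- stated objective: simpler
-- what changed: Replaces the index/slice bookkeeping (start, current_type, enumerate, text[start:idx] slices, trailing flush) with a single pass that either extends the last output run in place or opens a new one, so no indices, slices or post-loop append are needed.
import Mathlib
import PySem

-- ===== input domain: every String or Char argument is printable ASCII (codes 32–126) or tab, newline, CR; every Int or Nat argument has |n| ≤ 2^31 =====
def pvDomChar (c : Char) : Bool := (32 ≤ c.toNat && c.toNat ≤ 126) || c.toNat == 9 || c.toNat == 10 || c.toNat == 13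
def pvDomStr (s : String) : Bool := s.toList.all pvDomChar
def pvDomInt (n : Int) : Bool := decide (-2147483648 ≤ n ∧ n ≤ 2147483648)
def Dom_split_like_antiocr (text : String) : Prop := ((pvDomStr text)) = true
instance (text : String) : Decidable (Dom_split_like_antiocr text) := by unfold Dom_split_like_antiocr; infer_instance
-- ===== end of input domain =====

-- B replaces A's index/slice run tracking with a single pass that grows the last output run; objective: simpler.
-- Each Python dict {"char": …, "type": …} is the association list [("char", …), ("type", …)].

-- ===== PORT A =====

-- `c in _ENG_LETTERS`: _ENG_LETTERS = digits + ascii_letters + punctuation + " " is exactly the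
-- printable ASCII characters, code points 32..126 (a module constant shared by both versions).
def pvIsEng (c : Char) : Bool := 32 ≤ c.toNat && c.toNat ≤ 126

-- one iteration of A's `for idx, char in enumerate(text)` loop; state = (parts, start, current_type)
def aStep (s : List Char) (st : List (List (String × String)) × Int × String) (ic : Int × Char) :
    List (List (String × String)) × Int × String :=
  let cand := if pvIsEng ic.2 then "en" else "cn"
  if cand == st.2.2 then st
  else (st.1 ++ [[("char", String.ofList (PySem.List.slice s (some st.2.1) (some ic.1))), ("type", st.2.2)]],
        ic.1, cand)

def split_like_antiocr (text : String) : List (List (String × String)) :=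
  match text.toList with
  | [] => []
  | c0 :: rest =>
    let s := c0 :: rest
    let cur0 := if pvIsEng c0 then "en" else "cn"
    let fin := (PySem.List.enumerate s 0).foldl (aStep s) ([], 0, cur0)
    fin.1 ++ [[("char", String.ofList (PySem.List.slice s (some fin.2.1) none)), ("type", fin.2.2)]]

-- ===== PORT B =====

-- dict helpers on the two-key assoc-list encoding (exact Python dict semantics here:
-- first-match lookup; assignment to a present key overwrites in place)
def dGet (d : List (String × String)) (k : String) : String :=
  (((d.find? (·.1 == k)).map (·.2)).getD "")
def dSet (d : List (String × String)) (k : String) (v : String) : List (String × String) :=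
  d.map (fun p => if p.1 == k then (k, v) else p)

-- one iteration of B's `for ch in text` loop
def bStep (parts : List (List (String × String))) (c : Char) : List (List (String × String)) :=
  let t := if pvIsEng c then "en" else "cn"
  match parts.getLast? with
  | some last =>
    if dGet last "type" == t then
      parts.dropLast ++ [dSet last "char" (dGet last "char" ++ String.ofList [c])]
    else
      parts ++ [[("char", String.ofList [c]), ("type", t)]]
  | none => parts ++ [[("char", String.ofList [c]), ("type", t)]]

def split_like_antiocr_alt (text : String) : List (List (String × String)) :=
  text.toList.foldl bStep []

-- ===== PRECONDITION & SPEC =====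
def Spec_split_like_antiocr (text : String) (out : List (List (String × String))) : Prop := out = split_like_antiocr_alt text
instance (text : String) (out : List (List (String × String))) : Decidable (Spec_split_like_antiocr text out) := by unfold Spec_split_like_antiocr; infer_instance

-- ===== CLAIM (what is proved, stated in full; the proofs are below) =====
def Claim_equal_split_like_antiocr : Prop := ∀ (text : String), Dom_split_like_antiocr text → Spec_split_like_antiocr text (split_like_antiocr text)

-- ===== LEMMAS AND PROOFS =====

-- a run dict
def run (p : List Char) (t : String) : List (String × String) :=
  [("char", String.ofList p), ("type", t)]

def typ (c : Char) : String := if pvIsEng c then "en" else "cn"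

-- B's step on a state whose last run has type t
theorem bStep_last (parts : List (List (String × String))) (p : List Char) (t : String) (c : Char) :
    bStep (parts ++ [run p t]) c =
      if typ c = t then parts ++ [run (p ++ [c]) t]
      else (parts ++ [run p t]) ++ [run [c] (typ c)] := by
  by_cases h : typ c = t
  · simp [bStep, run, dGet, dSet, typ, ← String.ofList_append, ← h]
  · rw [if_neg h]
    have h' : ¬ ((if pvIsEng c then "en" else "cn") = t) := by simpa [typ] using h
    simp [bStep, run, dGet, typ]
    intro hcontr; exact absurd hcontr.symm h'

-- the main loop invariant: with a pending nonempty run `pend` of type t occupying s[start:i],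
-- A's remaining fold (plus its final flush) equals B's remaining fold from parts ++ [run pend t]
theorem main_inv (s : List Char) (r : List Char) :
    ∀ (i start : Nat) (parts : List (List (String × String))) (pend : List Char) (t : String),
      start + pend.length = i →
      (s.drop start).take pend.length = pend →
      s.drop i = r →
      pend ≠ [] →
      (∀ c ∈ pend, typ c = t) →
      (let fin := (PySem.List.enumerate r (i : Int)).foldl (aStep s) (parts, (start : Int), t)
       fin.1 ++ [[("char", String.ofList (PySem.List.slice s (some fin.2.1) none)), ("type", fin.2.2)]])
      = r.foldl bStep (parts ++ [run pend t]) := by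
  induction r with
  | nil =>
    intro i start parts pend t h1 h2 h3 _ _
    have hdrop : s.drop start = pend := by
      have : s.drop start = (s.drop start).take pend.length ++ (s.drop start).drop pend.length := by
        simp
      rw [this, h2, List.drop_drop, h1, h3, List.append_nil]
    simp [PySem.List.enumerate, PySem.List.slice_from, hdrop, run]
  | cons c r' ih =>
    intro i start parts pend t h1 h2 h3 hne h5
    have hdrop : s.drop start = pend ++ (c :: r') := by
      have : s.drop start = (s.drop start).take pend.length ++ (s.drop start).drop pend.length := by
        simp
      rw [this, h2, List.drop_drop, h1, h3]
    have hdropi : s.drop (i + 1) = r' := by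
      rw [← List.drop_drop, h3]; rfl
    rw [show ((PySem.List.enumerate (c :: r') (i : Int))) =
        ((i : Int), c) :: PySem.List.enumerate r' ((i : Int) + 1) from rfl]
    rw [List.foldl_cons, List.foldl_cons, bStep_last]
    by_cases hc : typ c = t
    · -- same type: A continues, B extends the last run
      have hstep : aStep s (parts, (start : Int), t) ((i : Int), c) = (parts, (start : Int), t) := by
        simp [aStep, typ] at hc ⊢; simp [hc]
      rw [hstep, if_pos hc]
      have h2' : (s.drop start).take (pend ++ [c]).length = pend ++ [c] := by
        rw [hdrop]; simp [List.take_append]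
      have := ih (i + 1) start parts (pend ++ [c]) t (by simp; omega) h2' hdropi
        (by simp) (by intro x hx; rcases List.mem_append.1 hx with h | h
                      · exact h5 x h
                      · simp at h; rw [h]; exact hc)
      have hcast : ((i : Nat) : Int) + 1 = (((i + 1 : Nat) : Nat) : Int) := by push_cast; ring
      rw [hcast]
      exact this
    · -- type switch: A flushes s[start:i], B opens a new run
      have hstep : aStep s (parts, (start : Int), t) ((i : Int), c) =
          (parts ++ [run pend t], (i : Int), typ c) := by
        have hslice : PySem.List.slice s (some (start : Int)) (some (i : Int)) = pend := by
          rw [PySem.List.slice_natCast]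
          have : i - start = pend.length := by omega
          rw [this, h2]
        simp only [aStep, typ] at hc ⊢
        rw [if_neg (by simpa using hc)]
        simp [hslice, run]
      rw [hstep, if_neg hc]
      have := ih (i + 1) i (parts ++ [run pend t]) [c] (typ c) (by simp)
        (by rw [h3]; rfl) hdropi (by simp) (by simp)
      have hcast : ((i : Nat) : Int) + 1 = (((i + 1 : Nat) : Nat) : Int) := by push_cast; ring
      rw [hcast]
      rw [List.append_assoc] at this ⊢
      exact this

-- ===== VERDICT (by name: the statement is the Claim_ definition above) =====
theorem split_like_antiocr_spec : Claim_equal_split_like_antiocr := by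
  intro text _
  unfold Spec_split_like_antiocr split_like_antiocr split_like_antiocr_alt
  cases hs : text.toList with
  | nil => simp
  | cons c0 rest =>
    simp only []
    -- first loop iteration of A: candidate type equals current_type, state unchanged
    rw [show PySem.List.enumerate (c0 :: rest) 0 = ((0 : Int), c0) :: PySem.List.enumerate rest 1 from rfl]
    rw [List.foldl_cons]
    have hstep0 : aStep (c0 :: rest) ([], 0, if pvIsEng c0 then "en" else "cn") ((0 : Int), c0)
        = ([], 0, if pvIsEng c0 then "en" else "cn") := by
      simp [aStep]
    rw [hstep0, List.foldl_cons]
    have hb0 : bStep [] c0 = [run [c0] (typ c0)] := by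
      simp [bStep, run, typ]
    have := main_inv (c0 :: rest) rest 1 0 [] [c0] (typ c0) (by simp) (by simp) (by simp)
      (by simp) (by simp)
    simp only [Nat.cast_zero, Nat.cast_one] at this
    rw [hb0]
    simpa [typ] using this
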